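-- pv_equiv track=rewrite | github.com/thynaptic/oricli-alpha | mavaia_core/brain/modules/advanced_reasoning_solvers.py | _apply_duplication
-- ===== SOURCE A (Python) =====
-- from typing import Dict, Any, Optional, List, Tuple
--
-- def _apply_duplication(grid: List[List[Any]], tiles_x: int, tiles_y: int) -> List[List[Any]]:
--     """
--     Apply duplication/tiling to grid
--
--     Args:
--         grid: Input grid
--         tiles_x: Number of horizontal tiles
--         tiles_y: Number of vertical tiles
--
--     Returns:
--         Tiled grid
--     """
--     height = len(grid)
--     width = len(grid[0]) if height > 0 else 0
--
--     new_height = height * tiles_y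
--     new_width = width * tiles_x
--
--     result = [[0 for _ in range(new_width)] for _ in range(new_height)]
--
--     for ty in range(tiles_y):
--         for tx in range(tiles_x):
--             for y in range(height):
--                 for x in range(width):
--                     result[ty * height + y][tx * width + x] = grid[y][x]
--
--     return result
-- ===== SOURCE B (Python) =====
-- from typing import Any, List
--
-- def _apply_duplication(grid: List[List[Any]], tiles_x: int, tiles_y: int) -> List[List[Any]]:
--     """Tile the grid tiles_x times horizontally and tiles_y times vertically."""
--     width = len(grid[0]) if grid else 0
--     return [row[:width] * tiles_x for _ in range(tiles_y) for row in grid]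
-- ===== Notes on version B (the rewrite author's own statement) =====
-- stated objective: simpler
-- what changed: Replaces the preallocated zero matrix and four nested loops with per-cell scatter writes by a single flat comprehension that slices each row, replicates it tiles_x times and replicates the row block tiles_y times.
import Mathlib
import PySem

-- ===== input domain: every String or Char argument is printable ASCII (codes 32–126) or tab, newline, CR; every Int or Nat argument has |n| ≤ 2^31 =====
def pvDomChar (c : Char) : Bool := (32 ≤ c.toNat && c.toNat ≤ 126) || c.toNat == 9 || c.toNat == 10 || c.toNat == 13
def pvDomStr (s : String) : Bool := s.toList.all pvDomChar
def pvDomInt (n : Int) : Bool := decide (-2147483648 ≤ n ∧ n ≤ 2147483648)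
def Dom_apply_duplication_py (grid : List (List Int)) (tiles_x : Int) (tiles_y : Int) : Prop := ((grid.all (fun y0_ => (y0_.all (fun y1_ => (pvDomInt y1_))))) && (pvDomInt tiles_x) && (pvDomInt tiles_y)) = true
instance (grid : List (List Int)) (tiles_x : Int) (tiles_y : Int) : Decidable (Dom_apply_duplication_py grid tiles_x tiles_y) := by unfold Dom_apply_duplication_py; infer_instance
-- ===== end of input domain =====

-- B drops the preallocated result matrix and index arithmetic: one flat comprehension
-- replicating each (truncated) row tiles_x times and the row block tiles_y times (simpler).
-- Note: equivalence is about the return value; neither program mutates its arguments.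

-- ===== PORT A =====
-- result[i][j] = v  (Python indices here are always in range; List.set is exact there)
def pvSet2 (res : List (List Int)) (i j : Nat) (v : Int) : List (List Int) :=
  res.set i ((res.getD i []).set j v)

def apply_duplication_py (grid : List (List Int)) (tiles_x : Int) (tiles_y : Int) : List (List Int) :=
  let height := grid.length
  let width := (grid.headD []).length  -- len(grid[0]) if height > 0 else 0
  let result := List.replicate ((height : Int) * tiles_y).toNat
                  (List.replicate ((width : Int) * tiles_x).toNat (0 : Int))
  -- range(n) over an int n: the naturals 0..n-1 (empty for n ≤ 0)
  (List.range tiles_y.toNat).foldl (fun res ty =>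
    (List.range tiles_x.toNat).foldl (fun res tx =>
      (List.range height).foldl (fun res y =>
        (List.range width).foldl (fun res x =>
          pvSet2 res (ty * height + y) (tx * width + x) ((grid.getD y []).getD x 0)) res) res) res)
    result

-- ===== PORT B =====
def apply_duplication_py_alt (grid : List (List Int)) (tiles_x : Int) (tiles_y : Int) : List (List Int) :=
  let width := (grid.headD []).length  -- len(grid[0]) if grid else 0
  -- [row[:width] * tiles_x for _ in range(tiles_y) for row in grid]
  (List.range tiles_y.toNat).flatMap (fun _ =>
    grid.map (fun row => (List.replicate tiles_x.toNat (row.take width)).flatten))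

-- ===== PRECONDITION & SPEC =====
-- Pre_ excludes only inputs where A raises IndexError: some row shorter than the first
-- row while both tile counts are ≥ 1 (only then is grid[y][x] ever read).
def Pre_apply_duplication_py (grid : List (List Int)) (tiles_x : Int) (tiles_y : Int) : Prop :=
  tiles_x ≤ 0 ∨ tiles_y ≤ 0 ∨ ∀ row ∈ grid, (grid.headD []).length ≤ row.length
instance (grid : List (List Int)) (tiles_x : Int) (tiles_y : Int) : Decidable (Pre_apply_duplication_py grid tiles_x tiles_y) := by unfold Pre_apply_duplication_py; infer_instance

def pvWitness_apply_duplication_py : List (List Int) × Int × Int := ([[1, 2], [3, 4]], 2, 2)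

def Spec_apply_duplication_py (grid : List (List Int)) (tiles_x : Int) (tiles_y : Int) (out : List (List Int)) : Prop := out = apply_duplication_py_alt grid tiles_x tiles_y
instance (grid : List (List Int)) (tiles_x : Int) (tiles_y : Int) (out : List (List Int)) : Decidable (Spec_apply_duplication_py grid tiles_x tiles_y out) := by unfold Spec_apply_duplication_py; infer_instance

-- ===== CLAIM (what is proved, stated in full; the proofs are below) =====
def Claim_equal_apply_duplication_py : Prop := ∀ (grid : List (List Int)) (tiles_x : Int) (tiles_y : Int), Dom_apply_duplication_py grid tiles_x tiles_y → Pre_apply_duplication_py grid tiles_x tiles_y → Spec_apply_duplication_py grid tiles_x tiles_y (apply_duplication_py grid tiles_x tiles_y)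

-- ===== LEMMAS AND PROOFS =====
def pvGet2 (res : List (List Int)) (i j : Nat) : Int := (res.getD i []).getD j 0

def pvScatter (res : List (List Int)) (ks : List ((Nat × Nat) × Int)) : List (List Int) :=
  ks.foldl (fun res k => pvSet2 res k.1.1 k.1.2 k.2) res

theorem pvGetD_set {α : Type} (l : List α) (i j : Nat) (a d : α) :
    (l.set i a).getD j d = if i = j ∧ i < l.length then a else l.getD j d := by
  simp only [List.getD, List.getElem?_set]
  by_cases h : i = j
  · subst h; by_cases hl : i < l.length <;> simp [hl]
  · simp [h]

theorem pvScatter_cons (res : List (List Int)) (a : (Nat × Nat) × Int)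
    (ks : List ((Nat × Nat) × Int)) :
    pvScatter res (a :: ks) = pvScatter (pvSet2 res a.1.1 a.1.2 a.2) ks := rfl

theorem pvSet2_length (res : List (List Int)) (i j : Nat) (v : Int) :
    (pvSet2 res i j v).length = res.length := by simp [pvSet2]

theorem pvSet2_getD (res : List (List Int)) (i j : Nat) (v : Int) (k : Nat) :
    (pvSet2 res i j v).getD k [] =
      if i = k ∧ i < res.length then (res.getD i []).set j v else res.getD k [] := by
  unfold pvSet2; rw [pvGetD_set]

theorem pvSet2_rowlen (res : List (List Int)) (i j : Nat) (v : Int) (k : Nat) :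
    ((pvSet2 res i j v).getD k []).length = (res.getD k []).length := by
  rw [pvSet2_getD]; split_ifs with h
  · rw [List.length_set, h.1]
  · rfl

theorem pvGet2_set2 (res : List (List Int)) (i j : Nat) (v : Int) (i' j' : Nat) :
    pvGet2 (pvSet2 res i j v) i' j' =
      if i = i' ∧ j = j' ∧ i < res.length ∧ j < (res.getD i []).length then v
      else pvGet2 res i' j' := by
  simp only [pvGet2, pvSet2_getD]
  by_cases h : i = i' ∧ i < res.length
  · rw [if_pos h, pvGetD_set, ← h.1]
    split_ifs with h1 h2 h2 <;> first | rfl | (exfalso; omega)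
  · rw [if_neg h, if_neg]
    intro hc
    exact h ⟨hc.1, hc.2.2.1⟩

theorem pvScatter_length (ks : List ((Nat × Nat) × Int)) (res : List (List Int)) :
    (pvScatter res ks).length = res.length := by
  induction ks generalizing res with
  | nil => rfl
  | cons k ks ih => rw [pvScatter_cons, ih, pvSet2_length]

theorem pvScatter_rowlen (ks : List ((Nat × Nat) × Int)) (res : List (List Int)) (k : Nat) :
    ((pvScatter res ks).getD k []).length = (res.getD k []).length := by
  induction ks generalizing res with
  | nil => rfl
  | cons a ks ih => rw [pvScatter_cons, ih, pvSet2_rowlen]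

theorem pvGet2_scatter_notmem (ks : List ((Nat × Nat) × Int)) (res : List (List Int)) (i j : Nat)
    (h : ∀ k ∈ ks, k.1 ≠ (i, j)) :
    pvGet2 (pvScatter res ks) i j = pvGet2 res i j := by
  induction ks generalizing res with
  | nil => rfl
  | cons a ks ih =>
    rw [pvScatter_cons, ih _ (fun k hk => h k (List.mem_cons_of_mem _ hk)), pvGet2_set2]
    have := h a (List.mem_cons_self)
    rw [if_neg]
    rintro ⟨h1, h2, -⟩
    exact this (by rw [← h1, ← h2])

theorem pvGet2_scatter_mem (ks : List ((Nat × Nat) × Int)) (res : List (List Int)) (i j : Nat)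
    (c : Int)
    (hex : ∃ k ∈ ks, k.1 = (i, j))
    (hval : ∀ k ∈ ks, k.1 = (i, j) → k.2 = c)
    (hi : i < res.length) (hj : j < (res.getD i []).length) :
    pvGet2 (pvScatter res ks) i j = c := by
  induction ks generalizing res with
  | nil => simp at hex
  | cons a ks ih =>
    rw [pvScatter_cons]
    by_cases hex' : ∃ k ∈ ks, k.1 = (i, j)
    · exact ih _ hex' (fun k hk => hval k (List.mem_cons_of_mem _ hk))
        (by rw [pvSet2_length]; exact hi) (by rw [pvSet2_rowlen]; exact hj)
    · have ha : a.1 = (i, j) := by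
        rcases hex with ⟨k, hk, hk1⟩
        rcases List.mem_cons.1 hk with h | h
        · rw [← h]; exact hk1
        · exact absurd ⟨k, h, hk1⟩ hex'
      push_neg at hex'
      rw [pvGet2_scatter_notmem _ _ _ _ hex', pvGet2_set2]
      have h1 : a.1.1 = i := by rw [ha]
      have h2 : a.1.2 = j := by rw [ha]
      subst h1 h2
      rw [if_pos ⟨rfl, rfl, hi, hj⟩]
      exact hval a List.mem_cons_self ha

theorem pvFoldl_flatMap {α β γ : Type} (l : List α) (g : α → List β) (f : γ → β → γ) (s : γ) :
    (l.flatMap g).foldl f s = l.foldl (fun s a => (g a).foldl f s) s := by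
  induction l generalizing s with
  | nil => rfl
  | cons a l ih => simp [List.flatMap_cons, List.foldl_append, ih]

def pvKeys (grid : List (List Int)) (H W Ty Tx : Nat) : List ((Nat × Nat) × Int) :=
  (List.range Ty).flatMap fun ty => (List.range Tx).flatMap fun tx =>
    (List.range H).flatMap fun y => (List.range W).map fun x =>
      ((ty * H + y, tx * W + x), (grid.getD y []).getD x 0)

theorem pvA_eq_scatter (grid : List (List Int)) (tiles_x tiles_y : Int) :
    apply_duplication_py grid tiles_x tiles_y =
      pvScatter
        (List.replicate ((grid.length : Int) * tiles_y).toNat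
          (List.replicate (((grid.headD []).length : Int) * tiles_x).toNat 0))
        (pvKeys grid grid.length (grid.headD []).length tiles_y.toNat tiles_x.toNat) := by
  unfold apply_duplication_py pvKeys pvScatter
  simp only [pvFoldl_flatMap, List.foldl_map]

theorem pvMem_keys (grid : List (List Int)) (H W Ty Tx : Nat) (k : (Nat × Nat) × Int) :
    k ∈ pvKeys grid H W Ty Tx ↔
      ∃ ty < Ty, ∃ tx < Tx, ∃ y < H, ∃ x < W,
        k = ((ty * H + y, tx * W + x), (grid.getD y []).getD x 0) := by
  simp [pvKeys, List.mem_flatMap, List.mem_map, List.mem_range, eq_comm]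

theorem pvFlatMap_const {α : Type} (n : Nat) (l : List α) :
    (List.range n).flatMap (fun _ => l) = (List.replicate n l).flatten := by
  induction n with
  | zero => rfl
  | succ n ih =>
    rw [List.range_succ, List.flatMap_append, ih, List.replicate_succ', List.flatten_append]
    simp

theorem pvLen_flatten_replicate {α : Type} (n : Nat) (l : List α) :
    ((List.replicate n l).flatten).length = n * l.length := by
  induction n with
  | zero => simp
  | succ n ih => simp [List.replicate_succ, ih, Nat.succ_mul, Nat.add_comm]

theorem pvGetD_flatten_replicate {α : Type} (n : Nat) (l : List α) (d : α) (i : Nat)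
    (hi : i < n * l.length) :
    ((List.replicate n l).flatten).getD i d = l.getD (i % l.length) d := by
  induction n generalizing i with
  | zero => omega
  | succ n ih =>
    rw [List.replicate_succ, List.flatten_cons]
    by_cases h : i < l.length
    · rw [List.getD_append _ _ _ _ h, Nat.mod_eq_of_lt h]
    · push_neg at h
      rw [Nat.succ_mul] at hi
      rw [List.getD_append_right _ _ _ _ h, ih _ (by omega), Nat.mod_eq_sub_mod h]

theorem pvToNat_mul (h : Nat) (t : Int) : ((h : Int) * t).toNat = h * t.toNat := by
  rcases t with n | n
  · have h1 : (Int.ofNat n) = (n : Int) := rfl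
    rw [h1, ← Nat.cast_mul, Int.toNat_natCast, Int.toNat_natCast]
  · have h1 : (Int.negSucc n).toNat = 0 := rfl
    rw [h1, Nat.mul_zero, Int.toNat_eq_zero]
    exact mul_nonpos_of_nonneg_of_nonpos (by positivity) (by omega)

theorem pvFlattenRepNil2 (H Ty : Nat) :
    (List.replicate Ty (List.replicate H ([] : List Int))).flatten = List.replicate (H * Ty) [] := by
  induction Ty with
  | zero => simp
  | succ n ih =>
    rw [List.replicate_succ, List.flatten_cons, ih, Nat.mul_succ, Nat.add_comm,
      List.replicate_add]

theorem pvMainN (grid : List (List Int)) (Tx Ty : Nat)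
    (hpre : Tx = 0 ∨ Ty = 0 ∨ ∀ row ∈ grid, (grid.headD []).length ≤ row.length) :
    pvScatter (List.replicate (grid.length * Ty) (List.replicate ((grid.headD []).length * Tx) 0))
        (pvKeys grid grid.length (grid.headD []).length Ty Tx) =
      (List.replicate Ty (grid.map (fun row =>
        (List.replicate Tx (row.take (grid.headD []).length)).flatten))).flatten := by
  set H := grid.length with hH
  set W := (grid.headD []).length with hW
  by_cases hdeg : W = 0 ∨ Tx = 0
  · have hkeys : pvKeys grid H W Ty Tx = [] := by
      rcases hdeg with h | h <;> simp [pvKeys, h]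
    have hM : W * Tx = 0 := by rcases hdeg with h | h <;> simp [h]
    have hrows : grid.map (fun row => (List.replicate Tx (row.take W)).flatten) =
        List.replicate H [] := by
      rw [List.eq_replicate_iff]
      refine ⟨by simp [hH], ?_⟩
      intro b hb
      rcases List.mem_map.1 hb with ⟨row, _, hrow⟩
      rcases hdeg with h | h
      · rw [← hrow, h]; simp
      · rw [← hrow, h]; simp
    rw [hkeys, hrows, hM]
    show List.replicate (H * Ty) (List.replicate 0 (0 : Int)) = _
    rw [List.replicate_zero, pvFlattenRepNil2]
  · push_neg at hdeg
    obtain ⟨hW0, hTx0⟩ := hdeg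
    have hWpos : 0 < W := Nat.pos_of_ne_zero hW0
    have hTxpos : 0 < Tx := Nat.pos_of_ne_zero hTx0
    by_cases hTy0 : Ty = 0
    · rw [hTy0]
      simp [pvKeys, pvScatter]
    have hwid : ∀ row ∈ grid, W ≤ row.length := by
      rcases hpre with h | h | h
      · exact absurd h hTx0
      · exact absurd h hTy0
      · exact h
    have hlenmap : (grid.map (fun row => (List.replicate Tx (row.take W)).flatten)).length = H := by
      simp [hH]
    apply List.ext_getElem
    · rw [pvScatter_length, List.length_replicate, pvLen_flatten_replicate, hlenmap,
        Nat.mul_comm]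
    · intro i h₁ h₂
      have hiN : i < H * Ty := by
        rw [pvScatter_length, List.length_replicate] at h₁; exact h₁
      have hHpos : 0 < H := by
        rcases Nat.eq_zero_or_pos H with h0 | h0
        · rw [h0, Nat.zero_mul] at hiN; omega
        · exact h0
      have himod : i % H < H := Nat.mod_lt _ hHpos
      set rowi := grid.getD (i % H) [] with hrowi
      have hrowmem : rowi ∈ grid := by
        rw [hrowi, List.getD_eq_getElem _ _ (by omega)]
        exact List.getElem_mem _
      have hwrow : W ≤ rowi.length := hwid _ hrowmem
      have htake : (rowi.take W).length = W := by
        rw [List.length_take]; omega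
      have hBrow : (List.replicate Ty
            (grid.map (fun row => (List.replicate Tx (row.take W)).flatten))).flatten.getD i [] =
          (List.replicate Tx (rowi.take W)).flatten := by
        rw [pvGetD_flatten_replicate _ _ _ _ (by rw [hlenmap]; rw [Nat.mul_comm] at hiN; exact hiN),
          hlenmap, List.getD_eq_getElem _ _ (by rw [List.length_map]; exact himod),
          List.getElem_map, hrowi, List.getD_eq_getElem _ _ himod]
      have hArowlen : ((pvScatter (List.replicate (H * Ty) (List.replicate (W * Tx) 0))
            (pvKeys grid H W Ty Tx)).getD i []).length = W * Tx := by
        rw [pvScatter_rowlen, List.getD_replicate _ hiN, List.length_replicate]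
      have hrowA : (pvScatter (List.replicate (H * Ty) (List.replicate (W * Tx) 0))
            (pvKeys grid H W Ty Tx)).getD i [] = (List.replicate Tx (rowi.take W)).flatten := by
        apply List.ext_getElem
        · rw [hArowlen, pvLen_flatten_replicate, htake, Nat.mul_comm]
        · intro j hj₁ hj₂
          have hjM : j < W * Tx := by rw [hArowlen] at hj₁; exact hj₁
          have hjmod : j % W < W := Nat.mod_lt _ hWpos
          rw [← List.getD_eq_getElem _ (0 : Int) hj₁, ← List.getD_eq_getElem _ (0 : Int) hj₂]
          have hRHS : ((List.replicate Tx (rowi.take W)).flatten).getD j 0 =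
              rowi.getD (j % W) 0 := by
            rw [pvGetD_flatten_replicate _ _ _ _ (by rw [htake, Nat.mul_comm]; exact hjM),
              htake, List.getD_eq_getElem _ _ (by rw [htake]; exact hjmod), List.getElem_take,
              ← List.getD_eq_getElem _ _ (by omega)]
          rw [hRHS]
          show pvGet2 _ i j = _
          apply pvGet2_scatter_mem
          · have e1 : (i / H) * H + i % H = i := by
              rw [Nat.mul_comm]; exact Nat.div_add_mod i H
            have e2 : (j / W) * W + j % W = j := by
              rw [Nat.mul_comm]; exact Nat.div_add_mod j W
            refine ⟨((i / H * H + i % H, j / W * W + j % W),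
              (grid.getD (i % H) []).getD (j % W) 0), ?_, by rw [e1, e2]⟩
            apply (pvMem_keys grid H W Ty Tx _).2
            exact ⟨i / H, (Nat.div_lt_iff_lt_mul hHpos).2 (by rw [Nat.mul_comm] at hiN; exact hiN),
              j / W, (Nat.div_lt_iff_lt_mul hWpos).2 (by rw [Nat.mul_comm] at hjM; exact hjM),
              i % H, himod, j % W, hjmod, rfl⟩
          · intro k hk hk1
            rcases (pvMem_keys grid H W Ty Tx _).1 hk with ⟨ty, hty, tx', htx', y, hy, x, hx, hkeq⟩
            subst hkeq
            simp only [Prod.mk.injEq] at hk1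
            obtain ⟨hki, hkj⟩ := hk1
            have hyy : i % H = y := by
              rw [← hki, Nat.add_comm, Nat.mul_comm, Nat.add_mul_mod_self_left,
                Nat.mod_eq_of_lt hy]
            have hxx : j % W = x := by
              rw [← hkj, Nat.add_comm, Nat.mul_comm, Nat.add_mul_mod_self_left,
                Nat.mod_eq_of_lt hx]
            show (grid.getD y []).getD x 0 = rowi.getD (j % W) 0
            rw [hrowi, hyy, hxx]
          · rw [List.length_replicate]; exact hiN
          · rw [List.getD_replicate _ hiN, List.length_replicate]; exact hjM
      rw [← List.getD_eq_getElem _ ([] : List Int) h₁, ← List.getD_eq_getElem _ ([] : List Int) h₂,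
        hrowA, hBrow]

theorem pvMain (grid : List (List Int)) (tiles_x tiles_y : Int)
    (hpre : tiles_x ≤ 0 ∨ tiles_y ≤ 0 ∨ ∀ row ∈ grid, (grid.headD []).length ≤ row.length) :
    apply_duplication_py grid tiles_x tiles_y = apply_duplication_py_alt grid tiles_x tiles_y := by
  have hB : apply_duplication_py_alt grid tiles_x tiles_y =
      (List.replicate tiles_y.toNat
        (grid.map (fun row =>
          (List.replicate tiles_x.toNat (row.take (grid.headD []).length)).flatten))).flatten := by
    unfold apply_duplication_py_alt
    rw [pvFlatMap_const]
  rw [pvA_eq_scatter, hB, pvToNat_mul, pvToNat_mul]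
  apply pvMainN
  rcases hpre with h | h | h
  · exact Or.inl (Int.toNat_eq_zero.2 h)
  · exact Or.inr (Or.inl (Int.toNat_eq_zero.2 h))
  · exact Or.inr (Or.inr h)

-- ===== VERDICT (by name: the statement is the Claim_ definition above) =====
theorem apply_duplication_py_spec : Claim_equal_apply_duplication_py := by
  intro grid tiles_x tiles_y _ hpre
  exact pvMain grid tiles_x tiles_y hpre
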